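-- pv_equiv track=rewrite | github.com/Glocker134/CS50-projects | lesson_6/credit.py | amex_check
-- ===== SOURCE A (Python) =====
-- def amex_check(card, count):
--     if card // 10 > 9 and count < 13:
--         return amex_check(card // 10, count + 1)
--     else:
--         aux = card % 10
--         aux2 = (card // 10) * 10
--         ans = aux + aux2
--         if ans == 34 or ans == 37:
--             return True
--         else:
--             return False
-- ===== SOURCE B (Python) =====
-- def amex_check(card, count):
--     # Iterative rewrite of the tail recursion: same arithmetic, loop instead of recursion.
--     while card // 10 > 9 and count < 13:
--         card //= 10
--         count += 1
--     ans = (card // 10) * 10 + card % 10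
--     return ans == 34 or ans == 37
-- ===== Notes on version B (the rewrite author's own statement) =====
-- stated objective: idiomatic
-- what changed: The tail recursion is rewritten as an iterative while loop that strips digits in place, then tests the remaining two-digit prefix directly.
import Mathlib
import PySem

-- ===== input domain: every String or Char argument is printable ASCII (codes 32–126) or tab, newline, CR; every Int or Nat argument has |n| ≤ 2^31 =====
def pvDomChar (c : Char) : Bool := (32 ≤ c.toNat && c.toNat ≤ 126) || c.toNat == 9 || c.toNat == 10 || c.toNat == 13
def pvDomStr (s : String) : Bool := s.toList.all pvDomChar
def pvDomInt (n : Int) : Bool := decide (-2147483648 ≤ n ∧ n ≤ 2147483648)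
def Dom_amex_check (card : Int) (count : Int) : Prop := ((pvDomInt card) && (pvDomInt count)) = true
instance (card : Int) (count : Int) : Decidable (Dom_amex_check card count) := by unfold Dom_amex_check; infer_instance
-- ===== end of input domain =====

-- B rewrites A's tail recursion as an iterative while loop (same arithmetic); objective: idiomatic.

-- ===== PORT A =====
-- literal port of A's tail recursion; terminates because count increases towards the cap 13,
-- and when count ≥ 13 the guard is false
def amex_check (card : Int) (count : Int) : Bool :=
  if PySem.Int.floordiv card 10 > 9 ∧ count < 13 then
    amex_check (PySem.Int.floordiv card 10) (count + 1)
  else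
    let aux := PySem.Int.mod card 10
    let aux2 := (PySem.Int.floordiv card 10) * 10
    let ans := aux + aux2
    if ans = 34 ∨ ans = 37 then true else false
termination_by (13 - count).toNat
decreasing_by omega

-- ===== PORT B =====
-- the while loop of Source B as fuel recursion; fuel (13 - count).toNat bounds the loop's
-- iteration count (each iteration does count += 1 and the guard needs count < 13)
def amexLoop : Nat → Int × Int → Int × Int
  | 0, s => s
  | n + 1, (card, count) =>
    if PySem.Int.floordiv card 10 > 9 ∧ count < 13 then
      amexLoop n (PySem.Int.floordiv card 10, count + 1)
    else (card, count)

def amex_check_alt (card : Int) (count : Int) : Bool :=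
  let s := amexLoop (13 - count).toNat (card, count)
  let ans := (PySem.Int.floordiv s.1 10) * 10 + PySem.Int.mod s.1 10
  (ans == 34) || (ans == 37)

-- ===== PRECONDITION & SPEC =====
def Spec_amex_check (card : Int) (count : Int) (out : Bool) : Prop := out = amex_check_alt card count
instance (card : Int) (count : Int) (out : Bool) : Decidable (Spec_amex_check card count out) := by unfold Spec_amex_check; infer_instance

-- ===== CLAIM (what is proved, stated in full; the proofs are below) =====
def Claim_equal_amex_check : Prop := ∀ (card : Int) (count : Int), Dom_amex_check card count → Spec_amex_check card count (amex_check card count)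

-- ===== LEMMAS AND PROOFS =====

-- A's else-branch equals B's final test (the two summands are just swapped)
lemma amex_final (card : Int) :
    (if PySem.Int.mod card 10 + (PySem.Int.floordiv card 10) * 10 = 34 ∨
        PySem.Int.mod card 10 + (PySem.Int.floordiv card 10) * 10 = 37 then true else false)
    = (((PySem.Int.floordiv card 10) * 10 + PySem.Int.mod card 10 == 34) ||
       ((PySem.Int.floordiv card 10) * 10 + PySem.Int.mod card 10 == 37)) := by
  generalize PySem.Int.mod card 10 = a
  generalize PySem.Int.floordiv card 10 = b
  rw [Int.add_comm a (b * 10)]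
  split_ifs with h <;> simp_all [beq_iff_eq]

lemma amex_key : ∀ (n : Nat) (card count : Int), (13 - count).toNat = n →
    amex_check card count =
      (let s := amexLoop n (card, count)
       let ans := (PySem.Int.floordiv s.1 10) * 10 + PySem.Int.mod s.1 10
       (ans == 34) || (ans == 37)) := by
  intro n
  induction n with
  | zero =>
    intro card count h
    rw [amex_check]
    have hc : ¬ (PySem.Int.floordiv card 10 > 9 ∧ count < 13) := by
      rintro ⟨-, h13⟩; omega
    simp only [if_neg hc, amexLoop]
    exact amex_final card
  | succ n ih =>
    intro card count h
    rw [amex_check]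
    simp only [amexLoop]
    by_cases hc : PySem.Int.floordiv card 10 > 9 ∧ count < 13
    · simp only [if_pos hc]
      exact ih (PySem.Int.floordiv card 10) (count + 1) (by omega)
    · simp only [if_neg hc]
      exact amex_final card

-- ===== VERDICT (by name: the statement is the Claim_ definition above) =====
theorem amex_check_spec : Claim_equal_amex_check := by
  intro card count _
  show amex_check card count = amex_check_alt card count
  exact amex_key (13 - count).toNat card count rfl
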